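-- pv_equiv track=rewrite | github.com/rikinptl/pesindia | download_images.py | categorize_image
-- ===== SOURCE A (Python) =====
-- def categorize_image(filename):
--     """Categorize images based on filename"""
--     filename_lower = filename.lower()
--
--     if 'banner' in filename_lower:
--         return 'banners'
--     elif 'product' in filename_lower or 'prod' in filename_lower:
--         return 'products'
--     elif any(word in filename_lower for word in ['melting', 'furnace', 'shot', 'blasting', 'pattern', 'machining', 'heat', 'treatment', 'felting']):
--         return 'facilities'
--     elif 'testimonial' in filename_lower or 'holcim' in filename_lower or 'cement' in filename_lower or 'metso' in filename_lower or 'tata' in filename_lower or 'jk-' in filename_lower or 'aditya' in filename_lower: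
--         return 'testimonials'
--     elif 'certificate' in filename_lower or 'iso' in filename_lower or 'ped' in filename_lower or 'norsok' in filename_lower or 'crisil' in filename_lower:
--         return 'certifications'
--     else:
--         return 'other'
-- ===== SOURCE B (Python) =====
-- # keyword -> priority (category rank); keys listed alphabetically: scanning order
-- # is irrelevant because the answer is the MINIMUM priority among matching keywords.
-- KEYWORD_PRIORITY = {
--     'aditya': 3, 'banner': 0, 'blasting': 2, 'cement': 3, 'certificate': 4,
--     'crisil': 4, 'felting': 2, 'furnace': 2, 'heat': 2, 'holcim': 3,
--     'iso': 4, 'jk-': 3, 'machining': 2, 'melting': 2, 'metso': 3,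
--     'norsok': 4, 'pattern': 2, 'ped': 4, 'prod': 1, 'product': 1,
--     'shot': 2, 'tata': 3, 'testimonial': 3, 'treatment': 2,
-- }
-- CATEGORIES = ['banners', 'products', 'facilities', 'testimonials', 'certifications', 'other']
--
-- def categorize_image(filename):
--     """Categorize images based on filename"""
--     filename_lower = filename.lower()
--     best = 5
--     for kw, pri in KEYWORD_PRIORITY.items():
--         if kw in filename_lower:
--             best = min(best, pri)
--     return CATEGORIES[best]
-- ===== Notes on version B (the rewrite author's own statement) =====
-- stated objective: alternative
-- what changed: Instead of an early-return if/elif chain over keyword groups, B folds once over a flat keyword-to-priority dict in alphabetical key order, accumulating the minimum matching priority, and indexes a category table with it; correctness rests on min being order-independent.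
import Mathlib
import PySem

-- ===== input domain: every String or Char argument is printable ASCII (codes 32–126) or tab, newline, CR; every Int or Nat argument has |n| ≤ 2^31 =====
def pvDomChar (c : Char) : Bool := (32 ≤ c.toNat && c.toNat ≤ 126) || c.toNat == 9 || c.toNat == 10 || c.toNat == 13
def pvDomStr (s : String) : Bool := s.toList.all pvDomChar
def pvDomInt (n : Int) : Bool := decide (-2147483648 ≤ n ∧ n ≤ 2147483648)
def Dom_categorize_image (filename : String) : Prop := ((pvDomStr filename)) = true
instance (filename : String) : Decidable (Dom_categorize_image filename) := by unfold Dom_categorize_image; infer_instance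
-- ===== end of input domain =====

-- B replaces A's early-return if/elif chain by a single min-accumulating fold over a flat
-- keyword→priority table in alphabetical key order, then a table lookup; alternative, same behaviour.

-- ===== PORT A =====
def categorize_image (filename : String) : String :=
  let filename_lower := PySem.Str.lower filename
  if PySem.Str.isIn "banner" filename_lower then "banners"
  else if PySem.Str.isIn "product" filename_lower || PySem.Str.isIn "prod" filename_lower then "products"
  else if (["melting", "furnace", "shot", "blasting", "pattern", "machining", "heat", "treatment", "felting"].any
      (fun word => PySem.Str.isIn word filename_lower)) then "facilities"
  else if PySem.Str.isIn "testimonial" filename_lower || PySem.Str.isIn "holcim" filename_lower ||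
      PySem.Str.isIn "cement" filename_lower || PySem.Str.isIn "metso" filename_lower ||
      PySem.Str.isIn "tata" filename_lower || PySem.Str.isIn "jk-" filename_lower ||
      PySem.Str.isIn "aditya" filename_lower then "testimonials"
  else if PySem.Str.isIn "certificate" filename_lower || PySem.Str.isIn "iso" filename_lower ||
      PySem.Str.isIn "ped" filename_lower || PySem.Str.isIn "norsok" filename_lower ||
      PySem.Str.isIn "crisil" filename_lower then "certifications"
  else "other"

-- ===== PORT B =====
-- the KEYWORD_PRIORITY dict, in Source B's (alphabetical) insertion order
def pvKeywordPriority : List (String × Nat) :=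
  [("aditya", 3), ("banner", 0), ("blasting", 2), ("cement", 3), ("certificate", 4),
   ("crisil", 4), ("felting", 2), ("furnace", 2), ("heat", 2), ("holcim", 3),
   ("iso", 4), ("jk-", 3), ("machining", 2), ("melting", 2), ("metso", 3),
   ("norsok", 4), ("pattern", 2), ("ped", 4), ("prod", 1), ("product", 1),
   ("shot", 2), ("tata", 3), ("testimonial", 3), ("treatment", 2)]

def pvCategories : List String :=
  ["banners", "products", "facilities", "testimonials", "certifications", "other"]

def categorize_image_alt (filename : String) : String :=
  let filename_lower := PySem.Str.lower filename
  let best := pvKeywordPriority.foldl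
      (fun acc kp => if PySem.Str.isIn kp.1 filename_lower then min acc kp.2 else acc) 5
  -- CATEGORIES[best]: best ≤ 5 always, so the index is in range and the default "" is unreachable
  (PySem.List.pyGet? pvCategories (Int.ofNat best)).getD ""

-- ===== PRECONDITION & SPEC =====
def Spec_categorize_image (filename : String) (out : String) : Prop := out = categorize_image_alt filename
instance (filename : String) (out : String) : Decidable (Spec_categorize_image filename out) := by unfold Spec_categorize_image; infer_instance

-- ===== CLAIM (what is proved, stated in full; the proofs are below) =====
def Claim_equal_categorize_image : Prop := ∀ (filename : String), Dom_categorize_image filename → Spec_categorize_image filename (categorize_image filename)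

-- ===== LEMMAS AND PROOFS =====

-- the step of B's fold
def pvStep (s : String) (acc : Nat) (kp : String × Nat) : Nat :=
  if PySem.Str.isIn kp.1 s then min acc kp.2 else acc

-- the same keywords regrouped by priority (A's group order); a permutation of the dict
def pvGrouped : List (String × Nat) :=
  (["banner"].map (fun k => (k, 0))) ++
  (["product", "prod"].map (fun k => (k, 1))) ++
  (["melting", "furnace", "shot", "blasting", "pattern", "machining", "heat", "treatment", "felting"].map (fun k => (k, 2))) ++
  (["testimonial", "holcim", "cement", "metso", "tata", "jk-", "aditya"].map (fun k => (k, 3))) ++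
  (["certificate", "iso", "ped", "norsok", "crisil"].map (fun k => (k, 4)))

theorem pvPerm : pvKeywordPriority.Perm pvGrouped := by decide

theorem pvStep_comm (s : String) (x y : String × Nat) (a : Nat) :
    pvStep s (pvStep s a x) y = pvStep s (pvStep s a y) x := by
  unfold pvStep; split_ifs <;> omega

theorem pvFold_group (s : String) (p a : Nat) (ks : List String) :
    List.foldl (pvStep s) a (ks.map (fun k => (k, p)))
      = if ks.any (fun k => PySem.Str.isIn k s) then min a p else a := by
  induction ks generalizing a with
  | nil => simp
  | cons k ks ih =>
      simp only [List.map_cons, List.foldl_cons, List.any_cons, pvStep]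
      by_cases h : PySem.Str.isIn k s = true
      · simp only [h, reduceIte, ih, Bool.true_or]
        split <;> omega
      · simp only [Bool.not_eq_true] at h
        simp only [h, Bool.false_eq_true, if_false, ih, Bool.false_or]

-- ===== VERDICT (by name: the statement is the Claim_ definition above) =====
theorem categorize_image_spec : Claim_equal_categorize_image := by
  intro filename _
  unfold Spec_categorize_image
  simp only [categorize_image, categorize_image_alt]
  have hfold : pvKeywordPriority.foldl
      (fun acc kp => if PySem.Str.isIn kp.1 (PySem.Str.lower filename) then min acc kp.2 else acc) 5
      = List.foldl (pvStep (PySem.Str.lower filename)) 5 pvGrouped :=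
    (pvPerm.foldl_eq' (fun x _ y _ a => pvStep_comm _ x y a) 5)
  rw [hfold]
  unfold pvGrouped
  rw [List.foldl_append, List.foldl_append, List.foldl_append, List.foldl_append]
  rw [pvFold_group, pvFold_group, pvFold_group, pvFold_group, pvFold_group]
  simp only [List.any_cons, List.any_nil, Bool.or_false, Bool.or_assoc]
  generalize (PySem.Str.isIn "banner" (PySem.Str.lower filename)) = b0
  generalize (PySem.Str.isIn "product" (PySem.Str.lower filename) || PySem.Str.isIn "prod" (PySem.Str.lower filename)) = b1
  generalize (PySem.Str.isIn "melting" (PySem.Str.lower filename) || (PySem.Str.isIn "furnace" (PySem.Str.lower filename) || (PySem.Str.isIn "shot" (PySem.Str.lower filename) || (PySem.Str.isIn "blasting" (PySem.Str.lower filename) || (PySem.Str.isIn "pattern" (PySem.Str.lower filename) || (PySem.Str.isIn "machining" (PySem.Str.lower filename) || (PySem.Str.isIn "heat" (PySem.Str.lower filename) || (PySem.Str.isIn "treatment" (PySem.Str.lower filename) || PySem.Str.isIn "felting" (PySem.Str.lower filename))))))))) = b2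
  generalize (PySem.Str.isIn "testimonial" (PySem.Str.lower filename) || (PySem.Str.isIn "holcim" (PySem.Str.lower filename) || (PySem.Str.isIn "cement" (PySem.Str.lower filename) || (PySem.Str.isIn "metso" (PySem.Str.lower filename) || (PySem.Str.isIn "tata" (PySem.Str.lower filename) || (PySem.Str.isIn "jk-" (PySem.Str.lower filename) || PySem.Str.isIn "aditya" (PySem.Str.lower filename))))))) = b3
  generalize (PySem.Str.isIn "certificate" (PySem.Str.lower filename) || (PySem.Str.isIn "iso" (PySem.Str.lower filename) || (PySem.Str.isIn "ped" (PySem.Str.lower filename) || (PySem.Str.isIn "norsok" (PySem.Str.lower filename) || PySem.Str.isIn "crisil" (PySem.Str.lower filename))))) = b4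
  cases b0 <;> cases b1 <;> cases b2 <;> cases b3 <;> cases b4 <;> rfl
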